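-- pv_equiv track=rewrite | github.com/FaseehUllahJafar/Weight-Training-using-Genetic-Algorithm | Project.py | convert_2D
-- ===== SOURCE A (Python) =====
-- def convert_2D(list):
--     temp = []
--     out = []
--     for i in list:
--         if i[len(i) - 1] == '\n':
--             temp.append(i)
--             out.append(temp)
--             temp = []
--         else:
--             temp.append(i)
--
--     return out
-- ===== SOURCE B (Python) =====
-- def convert_2D(list):
--     out = []
--     rest = list
--     while True:
--         k = -1
--         for j, i in enumerate(rest):
--             if i[len(i) - 1] == '\n':
--                 k = j
--                 break
--         if k == -1:
--             return out
--         out.append(rest[:k + 1])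
--         rest = rest[k + 1:]
-- ===== Notes on version B (the rewrite author's own statement) =====
-- stated objective: alternative
-- what changed: A grows a running temp-accumulator inside one fold and flushes it at each newline-terminated element; B repeatedly finds the index of the first newline-terminated element and splits the list there by slicing (rest[:k+1], rest[k+1:]), with no accumulator.
import Mathlib
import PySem

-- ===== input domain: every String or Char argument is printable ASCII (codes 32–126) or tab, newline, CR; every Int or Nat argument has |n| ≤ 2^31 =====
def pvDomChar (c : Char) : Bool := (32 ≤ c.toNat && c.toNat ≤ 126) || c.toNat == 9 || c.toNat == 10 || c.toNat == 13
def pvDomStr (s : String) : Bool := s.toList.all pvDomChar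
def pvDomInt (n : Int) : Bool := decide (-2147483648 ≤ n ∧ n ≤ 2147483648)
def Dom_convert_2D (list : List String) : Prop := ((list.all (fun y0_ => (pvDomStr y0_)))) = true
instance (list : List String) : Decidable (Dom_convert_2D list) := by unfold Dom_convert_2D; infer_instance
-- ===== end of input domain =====

-- B replaces A's running-accumulator fold by find-first-newline-and-split slicing: alternative decomposition, same cost.

-- ===== PORT A =====
-- the loop body of A: state is (temp, out)
def pvStepA (st : List String × List (List String)) (i : String) : List String × List (List String) :=
  if PySem.Str.pyGet? i ((PySem.Str.len i : Int) - 1) = some '\n' then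
    ([], st.2 ++ [st.1 ++ [i]])
  else
    (st.1 ++ [i], st.2)

def convert_2D (list : List String) : List (List String) :=
  (list.foldl pvStepA ([], [])).2

-- ===== PORT B =====
-- port of B's inner scan: index of the first newline-terminated element (for … break)
def pvFindNl : List String → Option Nat
  | [] => none
  | i :: rest =>
    if PySem.Str.pyGet? i ((PySem.Str.len i : Int) - 1) = some '\n' then some 0
    else (pvFindNl rest).map (· + 1)

-- needed by the port's termination proof
theorem pvFindNl_lt (xs : List String) (k : Nat) (h : pvFindNl xs = some k) : k < xs.length := by
  induction xs generalizing k with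
  | nil => simp [pvFindNl] at h
  | cons x xs ih =>
    simp only [pvFindNl] at h
    split at h
    · injection h with h; simp; omega
    · rcases Option.map_eq_some_iff.mp h with ⟨m, hm, rfl⟩
      have := ih m hm
      simp; omega

def convert_2D_alt (rest : List String) : List (List String) :=
  match hk : pvFindNl rest with
  | none => []
  | some k =>
    PySem.List.slice rest (some (0 : Int)) (some ((k : Int) + 1)) ::
      convert_2D_alt (PySem.List.slice rest (some ((k : Int) + 1)) none)
termination_by rest.length
decreasing_by
  have hlt := pvFindNl_lt rest k hk
  have : ((k : Int) + 1) = ((k + 1 : Nat) : Int) := by push_cast; ring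
  rw [this, PySem.List.slice_from_natCast]
  simp [List.length_drop]; omega

-- ===== PRECONDITION & SPEC =====
-- Pre_ excludes lists containing an empty string: there Python A (and B) raise IndexError on i[len(i)-1].
def Pre_convert_2D (list : List String) : Prop := ∀ s ∈ list, s ≠ ""
instance (list : List String) : Decidable (Pre_convert_2D list) := by unfold Pre_convert_2D; infer_instance
def pvWitness_convert_2D : List String := ["a", "b\n", "c"]

def Spec_convert_2D (list : List String) (out : List (List String)) : Prop := out = convert_2D_alt list
instance (list : List String) (out : List (List String)) : Decidable (Spec_convert_2D list out) := by unfold Spec_convert_2D; infer_instance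

-- ===== CLAIM (what is proved, stated in full; the proofs are below) =====
def Claim_equal_convert_2D : Prop := ∀ (list : List String), Dom_convert_2D list → Pre_convert_2D list → Spec_convert_2D list (convert_2D list)

-- ===== LEMMAS AND PROOFS =====

-- the out-component of A's fold splits off the initial accumulator
theorem pvFold_out_split (xs : List String) (temp : List String) (out : List (List String)) :
    (xs.foldl pvStepA (temp, out)).2 = out ++ (xs.foldl pvStepA (temp, [])).2 := by
  induction xs generalizing temp out with
  | nil => simp
  | cons x xs ih =>
    simp only [List.foldl_cons, pvStepA]
    split_ifs with h
    · rw [ih, ih [] ([] ++ [temp ++ [x]])]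
      simp
    · exact ih _ _

-- characterisation of A's fold by the first-newline index
theorem pvFold_key (xs : List String) (temp : List String) :
    (xs.foldl pvStepA (temp, [])).2 =
      match pvFindNl xs with
      | none => []
      | some k => (temp ++ xs.take (k + 1)) :: ((xs.drop (k + 1)).foldl pvStepA ([], [])).2 := by
  induction xs generalizing temp with
  | nil => simp [pvFindNl]
  | cons x xs ih =>
    simp only [List.foldl_cons, pvStepA, pvFindNl]
    split_ifs with h
    · simp only []
      rw [pvFold_out_split]
      simp
    · rw [ih (temp ++ [x])]
      cases hk : pvFindNl xs with
      | none => simp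
      | some k => simp [List.take_succ_cons, List.drop_succ_cons]

-- B's defining equation with slices rewritten to take/drop
theorem pvAlt_eq (xs : List String) :
    convert_2D_alt xs =
      match pvFindNl xs with
      | none => []
      | some k => xs.take (k + 1) :: convert_2D_alt (xs.drop (k + 1)) := by
  rw [convert_2D_alt]
  cases hk : pvFindNl xs with
  | none => rfl
  | some k =>
    have h1 : ((k : Int) + 1) = ((k + 1 : Nat) : Int) := by push_cast; ring
    simp only [h1, PySem.List.slice_zero_start, PySem.List.slice_to_natCast,
      PySem.List.slice_from_natCast]

theorem pvMain (n : Nat) (xs : List String) (hn : xs.length ≤ n) :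
    (xs.foldl pvStepA ([], [])).2 = convert_2D_alt xs := by
  induction n generalizing xs with
  | zero =>
    have : xs = [] := by cases xs <;> simp_all
    subst this; simp [convert_2D_alt, pvFindNl]
  | succ n ih =>
    rw [pvFold_key, pvAlt_eq]
    cases hk : pvFindNl xs with
    | none => rfl
    | some k =>
      have hlt := pvFindNl_lt xs k hk
      simp only [List.nil_append]
      rw [ih (xs.drop (k + 1)) (by simp [List.length_drop]; omega)]

-- ===== VERDICT (by name: the statement is the Claim_ definition above) =====
theorem convert_2D_spec : Claim_equal_convert_2D := by
  intro list _ _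
  unfold Spec_convert_2D convert_2D
  exact pvMain list.length list (le_refl _)
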